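-- pv_equiv track=rewrite | github.com/xBorox1/D-Wave-Leap---CVRP | vrp/vrp_problem.py | decode_answer_with_partition
-- ===== SOURCE A (Python) =====
-- def decode_answer_with_partition(sample, vehicles_partition):
--     result = list()
--     vehicle_result = list()
--     step = 0
--     vehicle = 0
--
--     for (s, dest) in sample:
--         if sample[(s, dest)] == 1:
--             vehicle_result.append(dest)
--             step += 1
--             if vehicles_partition[vehicle] == step:
--                 result.append(vehicle_result)
--                 step = 0
--                 vehicle += 1
--                 vehicle_result = list()
--                 if len(vehicles_partition) <= vehicle:
--                     return result
--
--     return result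
-- ===== SOURCE B (Python) =====
-- def decode_answer_with_partition(sample, vehicles_partition):
--     flat = [dest for (s, dest) in sample if sample[(s, dest)] == 1]
--     result = []
--     idx = 0
--     for count in vehicles_partition:
--         if count < 1 or idx + count > len(flat):
--             break
--         result.append(flat[idx:idx + count])
--         idx += count
--     return result
-- ===== Notes on version B (the rewrite author's own statement) =====
-- stated objective: simpler
-- what changed: Replaces A's interleaved per-item state machine (vehicle_result/step/vehicle counters with an early return) by two phases: first collect all selected destinations into one flat list, then cut that list into complete chunks by the partition counts.
import Mathlib
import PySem

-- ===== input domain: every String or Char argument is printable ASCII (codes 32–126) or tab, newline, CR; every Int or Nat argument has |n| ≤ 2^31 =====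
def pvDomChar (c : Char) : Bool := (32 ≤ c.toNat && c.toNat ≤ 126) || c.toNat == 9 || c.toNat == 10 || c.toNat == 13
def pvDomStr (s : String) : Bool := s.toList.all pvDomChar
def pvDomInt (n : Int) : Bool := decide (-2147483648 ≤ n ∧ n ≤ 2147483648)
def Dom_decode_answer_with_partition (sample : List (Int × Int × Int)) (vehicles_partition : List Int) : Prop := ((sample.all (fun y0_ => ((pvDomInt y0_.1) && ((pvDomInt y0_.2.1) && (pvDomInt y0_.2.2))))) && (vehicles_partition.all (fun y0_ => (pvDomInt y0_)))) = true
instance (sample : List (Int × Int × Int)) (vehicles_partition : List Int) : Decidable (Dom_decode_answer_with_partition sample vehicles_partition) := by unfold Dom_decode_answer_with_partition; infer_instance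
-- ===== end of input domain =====

-- B replaces A's interleaved per-item state machine by two phases (select all chosen
-- destinations, then cut the flat list into complete chunks by the partition counts);
-- objective: simpler. Equality proved on Pre_ (see its comment).

-- ===== PORT A =====
-- sample is a Python dict {(s,dest): v} → association list; sample[(s,dest)] = first match
def lookupA (sample : List (Int × Int × Int)) (k : Int × Int) : Option Int :=
  (sample.find? (fun t => (t.1, t.2.1) == k)).map (fun t => t.2.2)

-- the for-loop of A over the dict's keys, with its running state; the early
-- `return result` is the first branch of the close-of-chunk test
def goA (sample : List (Int × Int × Int)) (vp : List Int) :
    List (Int × Int × Int) → List (List Int) → List Int → Int → Int → List (List Int)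
  | [], result, _vr, _step, _vehicle => result
  | (s, dest, _v) :: rest, result, vr, step, vehicle =>
    if lookupA sample (s, dest) == some 1 then
      let vr' := vr ++ [dest]
      let step' := step + 1
      -- vehicles_partition[vehicle]: in-range whenever reached under Pre_ (else Python raises)
      if (PySem.List.pyGet? vp vehicle).getD 0 == step' then
        let result' := result ++ [vr']
        if (vp.length : Int) ≤ vehicle + 1 then result'
        else goA sample vp rest result' [] 0 (vehicle + 1)
      else goA sample vp rest result vr' step' vehicle
    else goA sample vp rest result vr step vehicle

def decode_answer_with_partition (sample : List (Int × Int × Int)) (vehicles_partition : List Int) : List (List Int) :=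
  goA sample vehicles_partition sample [] [] 0 0

-- ===== PORT B =====
-- flat = [dest for (s, dest) in sample if sample[(s, dest)] == 1]  (same dict lookup as A)
def flatB (sample : List (Int × Int × Int)) : List Int :=
  (sample.filter (fun t => lookupA sample (t.1, t.2.1) == some 1)).map (fun t => t.2.1)

-- the for-loop of B over the partition counts
def goB (flat : List Int) : List Int → List (List Int) → Int → List (List Int)
  | [], result, _idx => result
  | c :: cs, result, idx =>
    if c < 1 ∨ idx + c > (flat.length : Int) then result
    else goB flat cs (result ++ [PySem.List.slice flat (some idx) (some (idx + c))]) (idx + c)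

def decode_answer_with_partition_alt (sample : List (Int × Int × Int)) (vehicles_partition : List Int) : List (List Int) :=
  goB (flatB sample) vehicles_partition [] 0

-- ===== PRECONDITION & SPEC =====
-- Pre_ excludes (a) association lists with a duplicate (s,dest) key, which a Python dict
-- argument cannot represent, and (b) the inputs where A raises IndexError: an empty
-- vehicles_partition together with at least one entry of value 1 (A indexes
-- vehicles_partition[0] at the first selected destination).
def Pre_decode_answer_with_partition (sample : List (Int × Int × Int)) (vehicles_partition : List Int) : Prop :=
  (sample.map (fun t => (t.1, t.2.1))).Nodup ∧
  (vehicles_partition = [] → ∀ t ∈ sample, t.2.2 ≠ 1)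
instance (sample : List (Int × Int × Int)) (vehicles_partition : List Int) : Decidable (Pre_decode_answer_with_partition sample vehicles_partition) := by unfold Pre_decode_answer_with_partition; infer_instance

def pvWitness_decode_answer_with_partition : (List (Int × Int × Int)) × List Int :=
  ([(0, 1, 1), (0, 2, 0), (1, 3, 1), (1, 4, 1)], [1, 2])

def Spec_decode_answer_with_partition (sample : List (Int × Int × Int)) (vehicles_partition : List Int) (out : List (List Int)) : Prop := out = decode_answer_with_partition_alt sample vehicles_partition
instance (sample : List (Int × Int × Int)) (vehicles_partition : List Int) (out : List (List Int)) : Decidable (Spec_decode_answer_with_partition sample vehicles_partition out) := by unfold Spec_decode_answer_with_partition; infer_instance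

-- ===== CLAIM (what is proved, stated in full; the proofs are below) =====
def Claim_equal_decode_answer_with_partition : Prop := ∀ (sample : List (Int × Int × Int)) (vehicles_partition : List Int), Dom_decode_answer_with_partition sample vehicles_partition → Pre_decode_answer_with_partition sample vehicles_partition → Spec_decode_answer_with_partition sample vehicles_partition (decode_answer_with_partition sample vehicles_partition)

-- ===== LEMMAS AND PROOFS =====

-- selected destinations among the remaining items (same selection test as both ports)
def selOf (sample rest : List (Int × Int × Int)) : List Int :=
  (rest.filter (fun t => lookupA sample (t.1, t.2.1) == some 1)).map (fun t => t.2.1)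

-- reference chunking: cut `flat` into complete chunks of the given sizes
def chunks : List Int → List Int → List (List Int)
  | _, [] => []
  | flat, c :: cs =>
    if c < 1 ∨ (flat.length : Int) < c then []
    else flat.take c.toNat :: chunks (flat.drop c.toNat) cs

-- A's fill process abstracted on the flat selected list
def fill : List Int → List Int → List Int → List (List Int)
  | _vr, _flat, [] => []
  | _vr, [], _ :: _ => []
  | vr, d :: f, c :: cs =>
    if ((vr.length : Int) + 1) == c then (vr ++ [d]) :: fill [] f cs
    else fill (vr ++ [d]) f (c :: cs)

theorem fill_spec : ∀ (flat vr : List Int) (c : Int) (cs : List Int),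
    (c ≤ 0 ∨ (vr.length : Int) < c) →
    fill vr flat (c :: cs) =
      if c < 1 ∨ ((vr.length : Int) + (flat.length : Int)) < c then []
      else (vr ++ flat.take (c - vr.length).toNat) :: chunks (flat.drop (c - vr.length).toNat) cs := by
  intro flat
  induction flat with
  | nil =>
    intro vr c cs h
    simp only [fill]
    rw [if_pos (by simp only [List.length_nil, Int.natCast_zero, add_zero]; omega)]
  | cons d f ih =>
    intro vr c cs h
    simp only [fill]
    by_cases hc : ((vr.length : Int) + 1) = c
    · rw [if_pos (by simp only [beq_iff_eq]; exact hc)]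
      have hcond : ¬ (c < 1 ∨ ((vr.length : Int) + ((d :: f).length : Int)) < c) := by
        simp only [List.length_cons]; push_cast; omega
      rw [if_neg hcond]
      have h1 : (c - vr.length).toNat = 1 := by omega
      rw [h1]
      simp only [List.take_succ_cons, List.take_zero, List.drop_succ_cons, List.drop_zero]
      congr 1
      cases cs with
      | nil => simp [fill, chunks]
      | cons c' cs' =>
        rw [ih [] c' cs' (by simp; omega)]
        simp only [chunks, List.nil_append, List.length_nil]
        by_cases h2 : c' < 1 ∨ ((f.length : Int)) < c'
        · rw [if_pos (by push_cast; omega), if_pos h2]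
        · rw [if_neg (by push_cast; omega), if_neg h2]
          simp
    · rw [if_neg (by simp only [beq_iff_eq]; exact hc)]
      have h' : c ≤ 0 ∨ (((vr ++ [d]).length : Int)) < c := by
        simp only [List.length_append, List.length_cons, List.length_nil] at *
        push_cast at *; omega
      rw [ih (vr ++ [d]) c cs h']
      by_cases h2 : c < 1 ∨ ((vr.length : Int) + ((d :: f).length : Int)) < c
      · have h2' : c < 1 ∨ (((vr ++ [d]).length : Int) + (f.length : Int)) < c := by
          simp only [List.length_append, List.length_cons, List.length_nil] at *
          push_cast at *; omega
        rw [if_pos h2', if_pos h2]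
      · have h2' : ¬ (c < 1 ∨ (((vr ++ [d]).length : Int) + (f.length : Int)) < c) := by
          simp only [List.length_append, List.length_cons, List.length_nil] at *
          push_cast at *; omega
        rw [if_neg h2', if_neg h2]
        have hge : (vr.length : Int) + 1 ≤ c := by
          simp only [List.length_append, List.length_cons, List.length_nil] at *
          push_cast at *; omega
        have hA : (c - vr.length).toNat = (c - (vr ++ [d]).length).toNat + 1 := by
          simp only [List.length_append, List.length_cons, List.length_nil]
          push_cast; omega
        rw [hA]
        simp only [List.take_succ_cons, List.drop_succ_cons, List.append_assoc,
          List.singleton_append]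

theorem fill_nil_eq_chunks : ∀ (flat counts : List Int), fill [] flat counts = chunks flat counts := by
  intro flat counts
  cases counts with
  | nil => cases flat <;> simp [fill, chunks]
  | cons c cs =>
    rw [fill_spec flat [] c cs (by simp; omega)]
    simp only [chunks, List.length_nil, List.nil_append, Int.natCast_zero, zero_add]
    by_cases h : c < 1 ∨ ((flat.length : Int)) < c
    · rw [if_pos (by omega), if_pos h]
    · rw [if_neg (by omega), if_neg h]
      simp

-- A's loop computes result ++ fill vr (selected remainder) (counts from `vehicle` on),
-- provided step tracks vr.length and vehicle = k (a natural number)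
theorem goA_spec (sample : List (Int × Int × Int)) (vp : List Int) :
    ∀ (rest : List (Int × Int × Int)) (result : List (List Int)) (vr : List Int) (k : Nat),
      goA sample vp rest result vr (vr.length : Int) (k : Int) =
        result ++ fill vr (selOf sample rest) (vp.drop k) := by
  intro rest
  induction rest with
  | nil =>
    intro result vr k
    simp only [goA, selOf, List.filter_nil, List.map_nil]
    cases h : vp.drop k with
    | nil => simp [fill]
    | cons c cs => simp [fill]
  | cons t rest ih =>
    obtain ⟨s, dest, v⟩ := t
    intro result vr k
    simp only [goA, selOf, List.filter_cons]
    by_cases hsel : lookupA sample (s, dest) == some 1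
    · rw [if_pos hsel]
      simp only [hsel, if_pos, List.map_cons]
      by_cases hk : k < vp.length
      · have hget : (PySem.List.pyGet? vp (k : Int)).getD 0 = vp[k] := by
          rw [PySem.List.pyGet?_natCast]
          simp [List.getElem?_eq_getElem hk]
        have hdrop : vp.drop k = vp[k] :: vp.drop (k + 1) := List.drop_eq_getElem_cons hk
        by_cases hclose : vp[k] = (vr.length : Int) + 1
        · rw [if_pos (by rw [hget]; simp only [beq_iff_eq]; exact hclose)]
          rw [hdrop]
          simp only [fill]
          rw [if_pos (show ((vr.length : Int) + 1 == vp[k]) = true by simp only [beq_iff_eq]; exact hclose.symm)]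
          by_cases hlast : (vp.length : Int) ≤ (k : Int) + 1
          · rw [if_pos hlast]
            have : vp.drop (k + 1) = [] := List.drop_eq_nil_of_le (by omega)
            rw [this]
            have : fill [] ((List.map (fun t => t.2.1) (List.filter (fun t => lookupA sample (t.1, t.2.1) == some 1) rest))) [] = [] := by
              cases h : (List.map (fun t => t.2.1) (List.filter (fun t => lookupA sample (t.1, t.2.1) == some 1) rest)) <;> simp [fill]
            rw [this]
          · rw [if_neg hlast]
            have hk1 : ((k : Int) + 1) = ((k + 1 : Nat) : Int) := by push_cast; ring
            rw [hk1]
            have := ih (result ++ [vr ++ [dest]]) [] (k + 1)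
            simp only [List.length_nil, Int.natCast_zero] at this
            rw [this, List.append_assoc]
            rfl
        · rw [if_neg (by rw [hget]; simp only [beq_iff_eq]; exact fun h => hclose h)]
          have hlen : (vr.length : Int) + 1 = (((vr ++ [dest]).length : Nat) : Int) := by
            simp only [List.length_append, List.length_cons, List.length_nil]; omega
          rw [hlen, ih result (vr ++ [dest]) k]
          rw [hdrop]
          simp only [fill]
          rw [if_neg (show ¬ (((vr.length : Int) + 1 == vp[k]) = true) from by
            simp only [beq_iff_eq]; exact fun h => hclose h.symm)]
          simp only [selOf]
      · -- k out of range: lookup default 0 ≠ vr.length+1 ≥ 1, and vp.drop k = []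
        have hget : (PySem.List.pyGet? vp (k : Int)).getD 0 = 0 := by
          rw [PySem.List.pyGet?_natCast, List.getElem?_eq_none (by omega)]
          rfl
        rw [if_neg (show ¬ (((PySem.List.pyGet? vp (k : Int)).getD 0 == (vr.length : Int) + 1) = true) from by
          rw [hget]; simp only [beq_iff_eq]; omega)]
        have hlen : (vr.length : Int) + 1 = (((vr ++ [dest]).length : Nat) : Int) := by
          simp only [List.length_append, List.length_cons, List.length_nil]; omega
        rw [hlen, ih result (vr ++ [dest]) k]
        have hdrop : vp.drop k = [] := List.drop_eq_nil_of_le (by omega)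
        rw [hdrop]
        simp [fill]
    · rw [if_neg hsel]
      rw [ih result vr k]
      simp [selOf]
      rw [if_neg (by simpa using hsel)]

-- B's loop computes result ++ chunks (flat from idx on) counts
theorem goB_spec (flat : List Int) :
    ∀ (counts : List Int) (result : List (List Int)) (idx : Nat), idx ≤ flat.length →
      goB flat counts result (idx : Int) = result ++ chunks (flat.drop idx) counts := by
  intro counts
  induction counts with
  | nil => intro result idx _; simp [goB, chunks]
  | cons c cs ih =>
    intro result idx hidx
    simp only [goB, chunks]
    by_cases h : c < 1 ∨ (idx : Int) + c > (flat.length : Int)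
    · rw [if_pos h, if_pos (by simp only [List.length_drop]; omega)]
      simp
    · rw [if_neg h, if_neg (by simp only [List.length_drop]; omega)]
      have hc : (idx : Int) + c = ((idx + c.toNat : Nat) : Int) := by push_cast; omega
      rw [hc, ih (result ++ [PySem.List.slice flat (some (idx : Int)) (some ((idx + c.toNat : Nat) : Int))]) (idx + c.toNat) (by simp only [not_or, not_lt] at h; omega)]
      rw [List.append_assoc]
      congr 1
      have hslice : PySem.List.slice flat (some (idx : Int)) (some ((idx + c.toNat : Nat) : Int)) = (flat.drop idx).take c.toNat := by
        rw [PySem.List.slice_natCast]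
        congr 1
        omega
      rw [hslice, List.drop_drop]
      simp

-- ===== VERDICT (by name: the statement is the Claim_ definition above) =====
theorem decode_answer_with_partition_spec : Claim_equal_decode_answer_with_partition := by
  intro sample vp _ _
  unfold Spec_decode_answer_with_partition decode_answer_with_partition decode_answer_with_partition_alt
  have hA := goA_spec sample vp sample [] [] 0
  simp only [List.length_nil, Int.natCast_zero, List.drop_zero, List.nil_append] at hA
  have hB := goB_spec (flatB sample) vp [] 0 (Nat.zero_le _)
  simp only [Int.natCast_zero, List.drop_zero, List.nil_append] at hB
  rw [hA, hB, fill_nil_eq_chunks]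
  rfl
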